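-- pv_equiv track=rewrite | github.com/jupeeter8/Competetive-Programming | Practice/sorting/reducingdishes.py | reduceDishes
-- ===== SOURCE A (Python) =====
-- def reduceDishes(sat: list[int]) -> int:
--     # Fucntion Checks for total satisfaction using every suffix
--     sat.sort()
--     satisfaction = 0
--     for i in range(len(sat)):
--         mul = 1
--         curr_satisfaction = 0
--         for j in range(i, len(sat)):
--             curr_satisfaction = curr_satisfaction + sat[j] * mul
--             mul += 1
--         satisfaction = max(curr_satisfaction, satisfaction)
--     return satisfaction
-- ===== SOURCE B (Python) =====
-- def reduceDishes(sat: list[int]) -> int: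
--     # One backward pass over the sorted list: suffix sum, running weighted total, running max.
--     sat.sort()
--     suffix = 0
--     total = 0
--     best = 0
--     for x in reversed(sat):
--         suffix += x
--         total += suffix
--         if total > best:
--             best = total
--     return best
-- ===== Notes on version B (the rewrite author's own statement) =====
-- stated objective: faster
-- what changed: Replaced the quadratic loop that recomputes each suffix's weighted sum from scratch with a single backward pass maintaining a running suffix sum and weighted total, keeping the max.
import Mathlib
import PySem

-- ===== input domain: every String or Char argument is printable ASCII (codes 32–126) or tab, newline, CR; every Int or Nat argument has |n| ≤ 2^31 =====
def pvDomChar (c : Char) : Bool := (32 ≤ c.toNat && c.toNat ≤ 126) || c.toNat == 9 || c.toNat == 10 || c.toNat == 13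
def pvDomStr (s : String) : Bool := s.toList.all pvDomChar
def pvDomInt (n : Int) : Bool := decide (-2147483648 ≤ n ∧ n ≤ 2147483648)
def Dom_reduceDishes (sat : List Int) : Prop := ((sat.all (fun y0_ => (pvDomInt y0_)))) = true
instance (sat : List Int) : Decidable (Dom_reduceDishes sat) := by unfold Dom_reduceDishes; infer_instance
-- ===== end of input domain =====

-- Note: both Pythons sort the argument list in place; the equivalence proved here is about the return value.
-- B replaces A's per-suffix recomputation by one backward pass (running suffix sum + weighted total + max).

-- ===== PORT A =====
def reduceDishes (sat : List Int) : Int :=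
  let s := PySem.List.sorted sat (fun x => x) false
  (PySem.List.pyRange 0 (s.length : Int) 1).foldl
    (fun satisfaction i =>
      let curr := ((PySem.List.pyRange i (s.length : Int) 1).foldl
        (fun (p : Int × Int) j => (p.1 + PySem.List.pyGetD s j 0 * p.2, p.2 + 1)) (0, 1)).1
      max curr satisfaction) 0

-- ===== PORT B =====
def reduceDishes_alt (sat : List Int) : Int :=
  let s := PySem.List.sorted sat (fun x => x) false
  (s.reverse.foldl
    (fun (st : Int × Int × Int) x =>
      let suffix := st.1 + x
      let total := st.2.1 + suffix
      (suffix, total, if total > st.2.2 then total else st.2.2)) (0, 0, 0)).2.2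

-- ===== PRECONDITION & SPEC =====
def Spec_reduceDishes (sat : List Int) (out : Int) : Prop := out = reduceDishes_alt sat
instance (sat : List Int) (out : Int) : Decidable (Spec_reduceDishes sat out) := by unfold Spec_reduceDishes; infer_instance

-- ===== CLAIM (what is proved, stated in full; the proofs are below) =====
def Claim_equal_reduceDishes : Prop := ∀ (sat : List Int), Dom_reduceDishes sat → Spec_reduceDishes sat (reduceDishes sat)

-- ===== LEMMAS AND PROOFS =====

/-- Weighted sum of a list with multipliers starting at m: x0*m + x1*(m+1) + … -/
def pvWm : List Int → Int → Int
  | [], _ => 0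
  | x :: xs, m => x * m + pvWm xs (m + 1)

/-- Max over all suffixes' weighted sums (multipliers from 1), floored at 0. -/
def pvSpec : List Int → Int
  | [] => 0
  | x :: xs => max (pvWm (x :: xs) 1) (pvSpec xs)

lemma pvWm_succ (l : List Int) : ∀ m : Int, pvWm l (m + 1) = pvWm l m + l.sum := by
  induction l with
  | nil => simp [pvWm]
  | cons x xs ih =>
    intro m
    simp [pvWm, ih (m + 1)]
    ring

lemma pvSpec_nonneg (l : List Int) : 0 ≤ pvSpec l := by
  induction l with
  | nil => simp [pvSpec]
  | cons x xs ih => simp [pvSpec]; right; exact ih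

lemma inner_foldl (l : List Int) : ∀ (c m : Int),
    (l.foldl (fun (p : Int × Int) x => (p.1 + x * p.2, p.2 + 1)) (c, m)).1 = c + pvWm l m := by
  induction l with
  | nil => simp [pvWm]
  | cons x xs ih =>
    intro c m
    simp only [List.foldl_cons, ih, pvWm]
    ring

lemma outer_foldl (s : List Int) : ∀ (k i : Nat), i + k = s.length → ∀ acc : Int, 0 ≤ acc →
    (PySem.List.pyRange (i : Int) (s.length : Int) 1).foldl
      (fun satisfaction j =>
        let curr := ((PySem.List.pyRange j (s.length : Int) 1).foldl
          (fun (p : Int × Int) jj => (p.1 + PySem.List.pyGetD s jj 0 * p.2, p.2 + 1)) (0, 1)).1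
        max curr satisfaction) acc
      = max acc (pvSpec (s.drop i)) := by
  intro k
  induction k with
  | zero =>
    intro i hi acc hacc
    have hi' : i = s.length := by omega
    subst hi'
    rw [PySem.List.pyRange_one_eq_nil (by omega)]
    simp [pvSpec, hacc]
  | succ k ih =>
    intro i hi acc hacc
    have hilt : (i : Int) < (s.length : Int) := by exact_mod_cast (by omega : i < s.length)
    rw [PySem.List.pyRange_one_cons hilt]
    simp only [List.foldl_cons]
    have hinner : ((PySem.List.pyRange (i : Int) (s.length : Int) 1).foldl
        (fun (p : Int × Int) jj => (p.1 + PySem.List.pyGetD s jj 0 * p.2, p.2 + 1)) (0, 1)).1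
        = pvWm (s.drop i) 1 := by
      rw [PySem.List.foldl_pyRange_pyGetD' s 0
        (fun (p : Int × Int) x => (p.1 + x * p.2, p.2 + 1)) (0, 1) (by exact_mod_cast Nat.zero_le i)]
      simp [inner_foldl, Int.toNat_natCast]
    rw [hinner]
    have hcast : (i : Int) + 1 = ((i + 1 : Nat) : Int) := by push_cast; ring
    rw [hcast, ih (i + 1) (by omega) _ (le_trans hacc (le_max_right _ _))]
    have hdrop : s.drop i = s[i]'(by omega) :: s.drop (i + 1) := by
      rw [List.drop_eq_getElem_cons (by omega)]
    have hspec : pvSpec (s.drop i) = max (pvWm (s.drop i) 1) (pvSpec (s.drop (i + 1))) := by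
      rw [hdrop, pvSpec, ← hdrop]
    rw [hspec]
    omega

lemma b_foldl (l : List Int) :
    l.reverse.foldl
      (fun (st : Int × Int × Int) x =>
        let suffix := st.1 + x
        let total := st.2.1 + suffix
        (suffix, total, if total > st.2.2 then total else st.2.2)) (0, 0, 0)
    = (l.sum, pvWm l 1, pvSpec l) := by
  induction l with
  | nil => simp [pvWm, pvSpec]
  | cons x xs ih =>
    simp only [List.reverse_cons, List.foldl_append, ih, List.foldl_cons, List.foldl_nil]
    have h1 : pvWm xs 1 + (xs.sum + x) = pvWm (x :: xs) 1 := by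
      show _ = x * 1 + pvWm xs 2
      have h2 : pvWm xs 2 = pvWm xs 1 + xs.sum := by
        have := pvWm_succ xs 1; norm_num at this; exact this
      omega
    refine Prod.ext (by simp [List.sum_cons]; ring) (Prod.ext ?_ ?_)
    · simpa using h1
    · show (if pvWm xs 1 + (xs.sum + x) > pvSpec xs then pvWm xs 1 + (xs.sum + x) else pvSpec xs)
        = pvSpec (x :: xs)
      rw [h1, pvSpec]
      split <;> omega

-- ===== VERDICT (by name: the statement is the Claim_ definition above) =====
theorem reduceDishes_spec : Claim_equal_reduceDishes := by
  intro sat _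
  unfold Spec_reduceDishes reduceDishes reduceDishes_alt
  simp only [b_foldl]
  have h := outer_foldl (PySem.List.sorted sat (fun x => x) false)
    (PySem.List.sorted sat (fun x => x) false).length 0 (by omega) 0 le_rfl
  rw [List.drop_zero, max_eq_right (pvSpec_nonneg _)] at h
  simpa using h
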